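-- pv_equiv track=rewrite | github.com/lmteru/passagem-conhecimento | examples/hello-pipeline/flaskr/flaskr.py | numbers_to_species
-- ===== SOURCE A (Python) =====
-- def numbers_to_species(number):
--     conversion_json = {
--         "Iris-setosa": 0,
--         "Iris-virginica": 1,
--         "Iris-versicolor": 2
--     }
--
--     for key, value in conversion_json.items():
--         number = number.replace(str(value), key)
--
--     return number
-- ===== SOURCE B (Python) =====
-- def numbers_to_species(number):
--     mapping = {'0': 'Iris-setosa', '1': 'Iris-virginica', '2': 'Iris-versicolor'}
--     return ''.join(mapping.get(c, c) for c in number)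
-- ===== Notes on version B (the rewrite author's own statement) =====
-- stated objective: idiomatic
-- what changed: Replaces three sequential full-string str.replace passes with a single character-wise traversal that emits the mapped species name (or the character itself) via one dict lookup per character.
import Mathlib
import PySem

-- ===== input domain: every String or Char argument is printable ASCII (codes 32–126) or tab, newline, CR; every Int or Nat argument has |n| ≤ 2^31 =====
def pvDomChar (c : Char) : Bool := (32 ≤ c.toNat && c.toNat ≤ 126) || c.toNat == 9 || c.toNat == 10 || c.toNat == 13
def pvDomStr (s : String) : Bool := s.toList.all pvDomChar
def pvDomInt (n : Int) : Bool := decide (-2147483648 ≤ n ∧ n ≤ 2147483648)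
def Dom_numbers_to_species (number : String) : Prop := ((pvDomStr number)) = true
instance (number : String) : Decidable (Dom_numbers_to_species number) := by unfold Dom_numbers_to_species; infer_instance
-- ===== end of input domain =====

-- B replaces A's three sequential full-string replace passes with one character-wise
-- pass using a char→name lookup table (idiomatic; same results on all strings).


-- ===== PORT A =====
def numbers_to_species (number : String) : String :=
  let conversion_json : PySem.Dict String Int :=
    PySem.Dict.mk [("Iris-setosa", 0), ("Iris-virginica", 1), ("Iris-versicolor", 2)]
  conversion_json.items.foldl
    (fun number kv => PySem.Str.replace number (PySem.Int.toStr kv.2) kv.1) number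

-- ===== PORT B =====
def numbers_to_species_alt (number : String) : String :=
  let mapping : PySem.Dict Char String :=
    PySem.Dict.mk [('0', "Iris-setosa"), ('1', "Iris-virginica"), ('2', "Iris-versicolor")]
  PySem.Str.join "" (number.toList.map (fun c => mapping.getD c (String.ofList [c])))

-- ===== PRECONDITION & SPEC =====
def Spec_numbers_to_species (number : String) (out : String) : Prop := out = numbers_to_species_alt number
instance (number : String) (out : String) : Decidable (Spec_numbers_to_species number out) := by unfold Spec_numbers_to_species; infer_instance

-- ===== CLAIM (what is proved, stated in full; the proofs are below) =====
def Claim_equal_numbers_to_species : Prop := ∀ (number : String), Dom_numbers_to_species number → Spec_numbers_to_species number (numbers_to_species number)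

-- ===== LEMMAS AND PROOFS =====

-- replace with a single-char pattern is a flatMap over characters
theorem replace_go_single (c : Char) (new : List Char) :
    ∀ (l : List Char) (fuel : Nat) (acc : List Char), l.length ≤ fuel →
      PySem.Chars.replace.go [c] new fuel l acc
        = acc.reverse ++ l.flatMap (fun x => if x = c then new else [x]) := by
  intro l
  induction l with
  | nil =>
      intro fuel acc _
      cases fuel <;> simp [PySem.Chars.replace.go]
  | cons x t ih =>
      intro fuel acc hle
      cases fuel with
      | zero => simp at hle
      | succ n =>
        simp only [List.length_cons, Nat.succ_le_succ_iff] at hle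
        by_cases hx : x = c
        · subst hx
          have h1 : List.isPrefixOf [x] (x :: t) = true := by simp [List.isPrefixOf]
          rw [show PySem.Chars.replace.go [x] new (n+1) (x :: t) acc
              = PySem.Chars.replace.go [x] new n (List.drop [x].length (x :: t)) (new.reverse ++ acc) from by
            simp [PySem.Chars.replace.go, h1]]
          simp only [List.length_cons, List.length_nil, List.drop_succ_cons, List.drop_zero]
          rw [ih n (new.reverse ++ acc) hle]
          simp
        · have h1 : List.isPrefixOf [c] (x :: t) = false := by
            simp [List.isPrefixOf]; intro h; exact absurd h.symm hx
          rw [show PySem.Chars.replace.go [c] new (n+1) (x :: t) acc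
              = PySem.Chars.replace.go [c] new n t (x :: acc) from by
            simp [PySem.Chars.replace.go, h1]]
          rw [ih n (x :: acc) hle]
          simp [hx]

theorem replace_single (c : Char) (new l : List Char) :
    PySem.Chars.replace l [c] new = l.flatMap (fun x => if x = c then new else [x]) := by
  rw [PySem.Chars.replace, if_neg (by simp)]
  simpa using replace_go_single c new l l.length [] le_rfl

theorem join_empty_sep (parts : List (List Char)) :
    PySem.Chars.join [] parts = parts.flatten := by
  induction parts with
  | nil => simp [PySem.Chars.join_nil]
  | cons p rest ih =>
      cases rest with
      | nil => simp [PySem.Chars.join_singleton]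
      | cons q r => rw [PySem.Chars.join_cons_cons]; simp_all

-- the common single-pass character mapping both programs compute
def pvF (x : Char) : List Char :=
  if x = '0' then "Iris-setosa".toList
  else if x = '1' then "Iris-virginica".toList
  else if x = '2' then "Iris-versicolor".toList
  else [x]

theorem a_side (l : List Char) :
    (PySem.Chars.replace
      (PySem.Chars.replace
        (PySem.Chars.replace l ['0'] "Iris-setosa".toList)
        ['1'] "Iris-virginica".toList)
      ['2'] "Iris-versicolor".toList) = l.flatMap pvF := by
  simp only [replace_single]
  induction l with
  | nil => simp
  | cons x t ih =>
      simp only [List.flatMap_cons, List.flatMap_append, ih]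
      congr 1
      by_cases h0 : x = '0'
      · subst h0; decide
      · by_cases h1 : x = '1'
        · subst h1; decide
        · by_cases h2 : x = '2'
          · subst h2; decide
          · simp [pvF, h0, h1, h2]

theorem b_side (l : List Char) :
    PySem.Chars.join [] (l.map (fun c =>
      ((PySem.Dict.mk [('0', "Iris-setosa"), ('1', "Iris-virginica"), ('2', "Iris-versicolor")]).getD
        c (String.ofList [c])).toList)) = l.flatMap pvF := by
  rw [join_empty_sep, ← List.flatMap_def]
  apply List.flatMap_congr  -- pointwise
  intro x _
  by_cases h0 : x = '0'
  · subst h0; decide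
  · by_cases h1 : x = '1'
    · subst h1; decide
    · by_cases h2 : x = '2'
      · subst h2; decide
      · have b0 : ('0' == x) = false := beq_eq_false_iff_ne.mpr (Ne.symm h0)
        have b1 : ('1' == x) = false := beq_eq_false_iff_ne.mpr (Ne.symm h1)
        have b2 : ('2' == x) = false := beq_eq_false_iff_ne.mpr (Ne.symm h2)
        simp [pvF, h0, h1, h2, PySem.Dict.getD, PySem.Dict.get?, List.find?, b0, b1, b2]

-- ===== VERDICT (by name: the statement is the Claim_ definition above) =====
theorem numbers_to_species_spec : Claim_equal_numbers_to_species := by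
  intro number _
  unfold Spec_numbers_to_species numbers_to_species numbers_to_species_alt
  apply String.toList_inj.mp
  rw [PySem.Str.toList_join]
  have hb := b_side number.toList
  simp only [List.map_map, Function.comp_def] at hb ⊢
  rw [show ("" : String).toList = [] from rfl, hb]
  simp only [List.foldl, PySem.Str.toList_replace]
  exact a_side number.toList
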